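-- pv_equiv track=rewrite | github.com/resoto/Nonogram | Nonogram.py | candidates1
-- ===== SOURCE A (Python) =====
-- def copyArray(L):
--     L2 = []
--     for i in L:
--         L2.append(i)
--     return L2
--
-- def candidates1(L,S,l):
--
--     A = copyArray(S[l])
--     result = []
--
--     for i in range(0,len(L)):
--         for j in range(0,len(A)):
--
--             if not (L[i][j] == A[j]) and (A[j] or (A[j]==False)):
--                 break
--
--             if j == len(A)-1:
--                 result.append(L[i])
--
--
--     return result
-- ===== SOURCE B (Python) =====
-- def candidates1(L, S, l):
--     A = S[l]
--     if not A:
--         return []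
--     # column-wise elimination: keep a worklist of live row indices and
--     # shrink it at each constrained column of the pattern
--     alive = list(range(len(L)))
--     for j, v in enumerate(A):
--         if v or v == False:
--             alive = [i for i in alive if L[i][j] == v]
--     return [L[i] for i in alive]
-- ===== Notes on version B (the rewrite author's own statement) =====
-- stated objective: alternative
-- what changed: B transposes the loop structure: instead of A's row-by-row scan over every column with a break, B maintains a worklist of live row indices and sweeps the pattern's columns, filtering the worklist at each constrained column, then materialises the surviving rows.
import Mathlib
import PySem

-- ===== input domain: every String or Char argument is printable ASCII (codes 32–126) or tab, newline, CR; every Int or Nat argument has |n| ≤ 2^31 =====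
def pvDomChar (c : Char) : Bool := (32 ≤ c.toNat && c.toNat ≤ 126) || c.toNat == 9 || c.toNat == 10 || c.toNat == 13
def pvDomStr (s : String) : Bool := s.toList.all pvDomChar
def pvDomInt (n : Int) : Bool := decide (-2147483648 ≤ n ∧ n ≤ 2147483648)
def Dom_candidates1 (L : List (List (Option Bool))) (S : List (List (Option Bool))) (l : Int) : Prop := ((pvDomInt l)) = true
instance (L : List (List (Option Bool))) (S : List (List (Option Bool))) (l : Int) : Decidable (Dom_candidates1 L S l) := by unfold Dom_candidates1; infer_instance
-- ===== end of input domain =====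

-- B transposes the loop structure: a worklist of live row indices is shrunk column by column
-- at the pattern's constrained columns, then the surviving rows are materialised (alternative).

-- ===== PORT A =====
-- copyArray: append every element to a fresh list
def copyArrayA (L : List (Option Bool)) : List (Option Bool) :=
  L.foldl (fun acc x => acc ++ [x]) []

-- the inner 'for j in range(0, len(A))' loop with its break / last-index append;
-- returns true iff the row gets appended (L[i][j] / A[j] ported as pyGetD, exact inside Pre_)
def rowLoopA (row A : List (Option Bool)) (j : Nat) : Bool :=
  if j < A.length then
    if ¬(PySem.List.pyGetD row (j : Int) none == PySem.List.pyGetD A (j : Int) none)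
        ∧ (PySem.List.pyGetD A (j : Int) none).isSome then false
    else if (j : Int) = (A.length : Int) - 1 then true
    else rowLoopA row A (j + 1)
  else false
termination_by A.length - j

def candidates1 (L : List (List (Option Bool))) (S : List (List (Option Bool))) (l : Int) : List (List (Option Bool)) :=
  let A := copyArrayA ((PySem.List.pyGet? S l).getD [])
  L.foldl (fun result row => if rowLoopA row A 0 then result ++ [row] else result) []

-- ===== PORT B =====
def candidates1_alt (L : List (List (Option Bool))) (S : List (List (Option Bool))) (l : Int) : List (List (Option Bool)) :=
  let A := (PySem.List.pyGet? S l).getD []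
  if A.isEmpty then []
  else
    let alive := (PySem.List.enumerate A 0).foldl
      (fun alive p =>
        if p.2.isSome then
          alive.filter (fun i => PySem.List.pyGetD (PySem.List.pyGetD L i []) p.1 none == p.2)
        else alive)
      (PySem.List.pyRange 0 L.length 1)
    alive.map (fun i => PySem.List.pyGetD L i [])

-- ===== PRECONDITION & SPEC =====
-- Pre_ excludes exactly the inputs where Python A raises an IndexError: l out of range for S
-- (on S[l]), or some row of L shorter than a column the inner loop reaches (on L[i][j]);
-- 'the loop reaches column j' = every earlier column is a wildcard or matches the row.
def Pre_candidates1 (L : List (List (Option Bool))) (S : List (List (Option Bool))) (l : Int) : Prop :=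
  (PySem.List.pyGet? S l).isSome = true ∧
  ∀ row ∈ L, ∀ j : Nat, j < ((PySem.List.pyGet? S l).getD []).length →
    (∀ j' : Nat, j' < j →
        ((PySem.List.pyGet? S l).getD []).getD j' none = none ∨
        row.getD j' none = ((PySem.List.pyGet? S l).getD []).getD j' none) →
    j < row.length
instance (L : List (List (Option Bool))) (S : List (List (Option Bool))) (l : Int) : Decidable (Pre_candidates1 L S l) := by unfold Pre_candidates1; infer_instance

def pvWitness_candidates1 : List (List (Option Bool)) × List (List (Option Bool)) × Int :=
  ([[some true, none], [some false, some true]], [[some true, none]], 0)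

def Spec_candidates1 (L : List (List (Option Bool))) (S : List (List (Option Bool))) (l : Int) (out : List (List (Option Bool))) : Prop := out = candidates1_alt L S l
instance (L : List (List (Option Bool))) (S : List (List (Option Bool))) (l : Int) (out : List (List (Option Bool))) : Decidable (Spec_candidates1 L S l out) := by unfold Spec_candidates1; infer_instance

-- ===== CLAIM (what is proved, stated in full; the proofs are below) =====
def Claim_equal_candidates1 : Prop := ∀ (L : List (List (Option Bool))) (S : List (List (Option Bool))) (l : Int), Dom_candidates1 L S l → Pre_candidates1 L S l → Spec_candidates1 L S l (candidates1 L S l)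

-- ===== LEMMAS AND PROOFS =====
-- (the two ports in fact agree on ALL inputs; the proof below does not need Pre_, which only
--  delimits where Python A returns at all)

-- whether column k of the pattern A accepts the row: wildcard, or equal values
def matchAt (row A : List (Option Bool)) (k : Nat) : Bool :=
  !(A.getD k none).isSome || (row.getD k none == A.getD k none)

theorem copyArrayA_eq (L : List (Option Bool)) : copyArrayA L = L := by
  have h : ∀ (L acc : List (Option Bool)), L.foldl (fun acc x => acc ++ [x]) acc = acc ++ L := by
    intro L
    induction L with
    | nil => simp
    | cons x xs ih => intro acc; simp [List.foldl, ih]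
  simpa [copyArrayA] using h L []

theorem rowLoop_match_true (row A : List (Option Bool)) (j : Nat)
    (hbrk : ¬(¬(PySem.List.pyGetD row (j : Int) none == PySem.List.pyGetD A (j : Int) none) = true
        ∧ (PySem.List.pyGetD A (j : Int) none).isSome = true)) :
    matchAt row A j = true := by
  simp only [PySem.List.pyGetD_natCast] at hbrk
  unfold matchAt
  rcases not_and_or.mp hbrk with h1 | h2
  · rw [not_not.mp h1]; simp
  · simp only [Bool.not_eq_true] at h2
    rw [h2]; simp

theorem rowLoopA_eq_range' (row A : List (Option Bool)) (j : Nat) :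
    rowLoopA row A j =
      (decide (j < A.length) && (List.range' j (A.length - j)).all (matchAt row A)) := by
  fun_induction rowLoopA row A j with
  | case1 j h hbrk =>
    have hn : A.length - j = (A.length - (j+1)) + 1 := by omega
    simp only [PySem.List.pyGetD_natCast] at hbrk
    have hf : matchAt row A j = false := by
      unfold matchAt
      have e1 : (row.getD j none == A.getD j none) = false := by simpa using hbrk.1
      rw [e1, hbrk.2]; simp
    rw [hn, List.range'_succ, List.all_cons, hf]
    simp [h]
  | case2 j h hbrk hlast =>
    have hn : A.length - j = 1 := by omega
    rw [hn, List.range'_succ, List.all_cons, rowLoop_match_true row A j hbrk]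
    simp [h]
  | case3 j h hbrk hlast ih =>
    have hn : A.length - j = (A.length - (j+1)) + 1 := by omega
    have h1 : j + 1 < A.length := by omega
    rw [ih, hn, List.range'_succ, List.all_cons, rowLoop_match_true row A j hbrk]
    simp [h, h1]
  | case4 j h =>
    simp [h]

theorem rowLoopA_zero (row A : List (Option Bool)) :
    rowLoopA row A 0 = (!A.isEmpty && (List.range A.length).all (matchAt row A)) := by
  rw [rowLoopA_eq_range', List.range_eq_range']
  cases A <;> simp

-- B's column sweep: folding the conditional filters = one filter by the conjunction of all tests
theorem foldl_filter_eq (ps : List (Int × Option Bool)) (f : Int → Int × Option Bool → Bool) :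
    ∀ alive : List Int,
    ps.foldl (fun alive p => if p.2.isSome then alive.filter (fun i => f i p) else alive) alive
      = alive.filter (fun i => ps.all (fun p => !p.2.isSome || f i p)) := by
  induction ps with
  | nil => intro alive; simp
  | cons p ps ih =>
    intro alive
    by_cases hp : p.2.isSome
    · simp only [List.foldl_cons, hp, if_pos, ih, List.filter_filter, List.all_cons]
      apply List.filter_congr
      intro i _
      simp [hp, Bool.and_comm]
    · simp only [List.foldl_cons, hp, if_neg, ih, List.all_cons, Bool.not_eq_true] at *
      apply List.filter_congr
      intro i _
      simp [hp]
  termination_by ps => ps.length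

-- the per-index test over the enumerated pattern = the per-row matchAt test over column numbers
theorem enum_all_eq_matchAt (row A : List (Option Bool)) :
    (PySem.List.enumerate A 0).all
        (fun p => !p.2.isSome || (PySem.List.pyGetD row p.1 none == p.2))
      = (List.range A.length).all (matchAt row A) := by
  rw [PySem.List.enumerate_eq_map_pyRange (d := none), PySem.List.pyRange_one, List.all_map,
    List.all_map]
  simp
  refine List.all_congr rfl fun k => ?_
  simp [matchAt, PySem.List.pyGetD_natCast]

-- ===== VERDICT (by name: the statement is the Claim_ definition above) =====
theorem candidates1_spec : Claim_equal_candidates1 := by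
  intro L S l _ _
  unfold Spec_candidates1 candidates1 candidates1_alt
  rw [copyArrayA_eq]
  set A := (PySem.List.pyGet? S l).getD [] with hA
  rw [PySem.List.foldl_append_if_eq_filter]
  by_cases hE : A.isEmpty
  · have : ∀ row : List (Option Bool), rowLoopA row A 0 = false := by
      intro row; rw [rowLoopA_zero, hE]; simp
    simp [hE, this]
  · simp only [hE, if_neg, Bool.false_eq_true, not_false_iff, List.nil_append]
    rw [foldl_filter_eq]
    have hmap : ∀ P : List (Option Bool) → Bool,
        ((PySem.List.pyRange 0 (L.length : Int) 1).filter
            (fun i => P (PySem.List.pyGetD L i []))).map (fun i => PySem.List.pyGetD L i [])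
          = L.filter P := by
      intro P
      rw [show (fun i => P (PySem.List.pyGetD L i [])) = (P ∘ fun i => PySem.List.pyGetD L i []) from rfl,
        ← List.filter_map, PySem.List.map_pyGetD_pyRange_zero']
    rw [hmap (fun row => (PySem.List.enumerate A 0).all
        (fun p => !p.2.isSome || (PySem.List.pyGetD row p.1 none == p.2)))]
    apply List.filter_congr
    intro row _
    rw [rowLoopA_zero, ← enum_all_eq_matchAt]
    simp at hE
    simp [hE]
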